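-- pv_equiv track=rewrite | github.com/mdkasikc/AdventOfCode | 2025/aoc04/src/aoc04.py | get_indices_of_rolls_to_remove
-- ===== SOURCE A (Python) =====
-- def get_indices_of_rolls_to_remove(rolls_list):
--     """
--     Returns a list of tuples representing the indices of rolls of paper in the rolls_list
--     which can be removed. A removeable roll of paper is defined as one that has fewer than 4
--     rolls of paper in the eight adjacent positions (horizontally, vertically, and diagonally).
--     A roll of paper is represented by the "@" character. No roll is represented by the "." character.
--
--     :param rolls_list: List of strings representing rolls of paper
--     :return: List of tuples (i, j) where rolls_list[i][j] == '@'
--     """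
--     directions = [(-1, -1), (-1, 0), (-1, 1),
--                   (0, -1),          (0, 1),
--                   (1, -1),  (1, 0), (1, 1)]
--
--     def is_valid(x, y):
--         return 0 <= x < len(rolls_list) and 0 <= y < len(rolls_list[0])
--
--     removable_indices = []
--     for i in range(len(rolls_list)):
--         for j in range(len(rolls_list[0])):
--             if rolls_list[i][j] == '@':
--                 adjacent_count = 0
--                 for dx, dy in directions:
--                     ni, nj = i + dx, j + dy
--                     if is_valid(ni, nj) and rolls_list[ni][nj] == '@':
--                         adjacent_count += 1
--                 if adjacent_count < 4:
--                     removable_indices.append((i, j))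
--     return removable_indices
-- ===== SOURCE B (Python) =====
-- def get_indices_of_rolls_to_remove(rolls_list):
--     if not rolls_list:
--         return []
--     n = len(rolls_list)
--     w = len(rolls_list[0])
--     directions = [(-1, -1), (-1, 0), (-1, 1),
--                   (0, -1),          (0, 1),
--                   (1, -1),  (1, 0), (1, 1)]
--     # scatter pass: every '@' cell increments the neighbor-count of its 8 in-bounds neighbors
--     counts = {}
--     for i in range(n):
--         for j in range(w):
--             if rolls_list[i][j] == '@':
--                 for dx, dy in directions:
--                     ni, nj = i + dx, j + dy
--                     if 0 <= ni < n and 0 <= nj < w: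
--                         counts[(ni, nj)] = counts.get((ni, nj), 0) + 1
--     # collect pass
--     return [(i, j) for i in range(n) for j in range(w)
--             if rolls_list[i][j] == '@' and counts.get((i, j), 0) < 4]
-- ===== Notes on version B (the rewrite author's own statement) =====
-- stated objective: alternative
-- what changed: Inverted the traversal: instead of gathering (for each '@' cell, probe its 8 neighbors in the grid), B scatters - one pass over all cells increments a dict of neighbor counts for each '@' cell's in-bounds neighbors, then a second row-major pass collects '@' cells whose accumulated count is < 4.
import Mathlib
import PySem

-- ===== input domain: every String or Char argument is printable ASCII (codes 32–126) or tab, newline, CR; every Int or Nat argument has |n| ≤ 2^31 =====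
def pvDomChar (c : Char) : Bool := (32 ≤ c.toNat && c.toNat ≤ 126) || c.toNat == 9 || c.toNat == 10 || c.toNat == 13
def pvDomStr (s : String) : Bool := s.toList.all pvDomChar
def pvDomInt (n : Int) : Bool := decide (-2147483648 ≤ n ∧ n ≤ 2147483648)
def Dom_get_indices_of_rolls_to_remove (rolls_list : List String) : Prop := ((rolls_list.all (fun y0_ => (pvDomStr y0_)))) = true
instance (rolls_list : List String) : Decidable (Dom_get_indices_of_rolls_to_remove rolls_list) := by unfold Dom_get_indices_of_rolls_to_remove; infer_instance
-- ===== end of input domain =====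

-- B inverts A's gather (probe the 8 neighbors of each '@' cell) into a scatter (one pass
-- accumulating each '@' cell's contribution to its neighbors' counts in a dict, then a
-- collect pass); a genuinely different traversal at the same cost.

-- shared primitive readings of Python expressions both sources contain
def pvDirs : List (Int × Int) := [(-1, -1), (-1, 0), (-1, 1), (0, -1), (0, 1), (1, -1), (1, 0), (1, 1)]

-- rolls_list[i][j] == '@'  (exact: pyGet? none = IndexError, excluded by Pre_)
def pvCell (rl : List String) (i j : Int) : Bool :=
  ((PySem.List.pyGet? rl i).bind (fun s => PySem.Str.pyGet? s j)) == some '@'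

def pvN (rl : List String) : Int := rl.length
-- len(rolls_list[0])  (only reached when the list is nonempty)
def pvW (rl : List String) : Int := ((PySem.List.pyGet? rl 0).getD "").toList.length

-- 0 <= x < len(rolls_list) and 0 <= y < len(rolls_list[0])
def pvValid (rl : List String) (x y : Int) : Bool :=
  decide (0 ≤ x ∧ x < pvN rl) && decide (0 ≤ y ∧ y < pvW rl)

-- ===== PORT A =====
def get_indices_of_rolls_to_remove (rolls_list : List String) : List (Int × Int) :=
  (PySem.List.pyRange 0 (pvN rolls_list) 1).foldl (fun acc i =>
    (PySem.List.pyRange 0 (pvW rolls_list) 1).foldl (fun acc j =>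
      if pvCell rolls_list i j then
        let adjacent_count : Int := pvDirs.foldl (fun cnt d =>
          if pvValid rolls_list (i + d.1) (j + d.2) && pvCell rolls_list (i + d.1) (j + d.2)
          then cnt + 1 else cnt) 0
        if adjacent_count < 4 then acc ++ [(i, j)] else acc
      else acc) acc) []

-- ===== PORT B =====
def get_indices_of_rolls_to_remove_alt (rolls_list : List String) : List (Int × Int) :=
  if rolls_list = [] then [] else
  let counts : PySem.Dict (Int × Int) Int :=
    (PySem.List.pyRange 0 (pvN rolls_list) 1).foldl (fun d i =>
      (PySem.List.pyRange 0 (pvW rolls_list) 1).foldl (fun d j =>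
        if pvCell rolls_list i j then
          pvDirs.foldl (fun d dd =>
            if pvValid rolls_list (i + dd.1) (j + dd.2) then
              d.insert (i + dd.1, j + dd.2) (d.getD (i + dd.1, j + dd.2) 0 + 1)
            else d) d
        else d) d) PySem.Dict.empty
  (PySem.List.pyRange 0 (pvN rolls_list) 1).flatMap (fun i =>
    ((PySem.List.pyRange 0 (pvW rolls_list) 1).filter (fun j =>
      pvCell rolls_list i j && decide (counts.getD (i, j) 0 < 4))).map (fun j => (i, j)))


-- ===== PRECONDITION & SPEC =====
-- Pre_ excludes exactly the ragged inputs on which A raises IndexError: some row shorter than row 0.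
def Pre_get_indices_of_rolls_to_remove (rolls_list : List String) : Prop :=
  ∀ s ∈ rolls_list, pvW rolls_list ≤ (s.toList.length : Int)
instance (rolls_list : List String) : Decidable (Pre_get_indices_of_rolls_to_remove rolls_list) := by
  unfold Pre_get_indices_of_rolls_to_remove; infer_instance

def pvWitness_get_indices_of_rolls_to_remove : List String := ["@.@", ".@.", "@.."]

def Spec_get_indices_of_rolls_to_remove (rolls_list : List String) (out : List (Int × Int)) : Prop := out = get_indices_of_rolls_to_remove_alt rolls_list
instance (rolls_list : List String) (out : List (Int × Int)) : Decidable (Spec_get_indices_of_rolls_to_remove rolls_list out) := by unfold Spec_get_indices_of_rolls_to_remove; infer_instance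

-- ===== CLAIM (what is proved, stated in full; the proofs are below) =====
def Claim_equal_get_indices_of_rolls_to_remove : Prop := ∀ (rolls_list : List String), Dom_get_indices_of_rolls_to_remove rolls_list → Pre_get_indices_of_rolls_to_remove rolls_list → Spec_get_indices_of_rolls_to_remove rolls_list (get_indices_of_rolls_to_remove rolls_list)

-- ===== LEMMAS AND PROOFS =====

theorem pvIncs_getD (rl : List String) (i j : Int) (l : List (Int × Int))
    (dc : PySem.Dict (Int × Int) Int) (q : Int × Int) :
    (l.foldl (fun d dd =>
        if pvValid rl (i + dd.1) (j + dd.2) then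
          d.insert (i + dd.1, j + dd.2) (d.getD (i + dd.1, j + dd.2) 0 + 1)
        else d) dc).getD q 0
      = dc.getD q 0 +
        (l.countP (fun dd => pvValid rl (i + dd.1) (j + dd.2) && ((i + dd.1, j + dd.2) == q)) : Int) := by
  induction l generalizing dc with
  | nil => simp
  | cons dd l ih =>
    simp only [List.foldl_cons, List.countP_cons]
    by_cases hv : pvValid rl (i + dd.1) (j + dd.2)
    · by_cases hq : (i + dd.1, j + dd.2) = q
      · rw [ih]
        simp [hv, hq]
        omega
      · rw [ih]
        simp [hv, hq, PySem.Dict.getD_insert, Ne.symm hq]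
    · simp [hv, ih]

def pvH (rl : List String) (i j : Int) (q : Int × Int) : Int :=
  if pvCell rl i j then
    (pvDirs.countP (fun dd => pvValid rl (i + dd.1) (j + dd.2) && ((i + dd.1, j + dd.2) == q)) : Int)
  else 0

theorem pvRow_getD (rl : List String) (i : Int) (lj : List Int)
    (dc : PySem.Dict (Int × Int) Int) (q : Int × Int) :
    (lj.foldl (fun d j =>
        if pvCell rl i j then
          pvDirs.foldl (fun d dd =>
            if pvValid rl (i + dd.1) (j + dd.2) then
              d.insert (i + dd.1, j + dd.2) (d.getD (i + dd.1, j + dd.2) 0 + 1)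
            else d) d
        else d) dc).getD q 0
      = dc.getD q 0 + (lj.map (fun j => pvH rl i j q)).sum := by
  induction lj generalizing dc with
  | nil => simp
  | cons j lj ih =>
    simp only [List.foldl_cons, List.map_cons, List.sum_cons]
    by_cases hc : pvCell rl i j
    · rw [ih, if_pos hc, pvIncs_getD]
      simp [pvH, hc]
      ring
    · rw [ih]
      simp [pvH, hc]

theorem pvCounts_getD (rl : List String) (li : List Int)
    (dc : PySem.Dict (Int × Int) Int) (q : Int × Int) :
    (li.foldl (fun d i =>
        (PySem.List.pyRange 0 (pvW rl) 1).foldl (fun d j =>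
          if pvCell rl i j then
            pvDirs.foldl (fun d dd =>
              if pvValid rl (i + dd.1) (j + dd.2) then
                d.insert (i + dd.1, j + dd.2) (d.getD (i + dd.1, j + dd.2) 0 + 1)
              else d) d
          else d) d) dc).getD q 0
      = dc.getD q 0 +
        (li.map (fun i => ((PySem.List.pyRange 0 (pvW rl) 1).map (fun j => pvH rl i j q)).sum)).sum := by
  induction li generalizing dc with
  | nil => simp
  | cons i li ih =>
    simp only [List.foldl_cons, List.map_cons, List.sum_cons]
    rw [ih, pvRow_getD]
    ring

def pvCnt (rl : List String) (i j : Int) : Int :=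
  pvDirs.foldl (fun cnt d =>
    if pvValid rl (i + d.1) (j + d.2) && pvCell rl (i + d.1) (j + d.2)
    then cnt + 1 else cnt) 0

theorem pvA_normal (rl : List String) :
    get_indices_of_rolls_to_remove rl =
      (PySem.List.pyRange 0 (pvN rl) 1).flatMap (fun i =>
        ((PySem.List.pyRange 0 (pvW rl) 1).filter (fun j =>
          pvCell rl i j && decide (pvCnt rl i j < 4))).map (fun j => (i, j))) := by
  unfold get_indices_of_rolls_to_remove
  have hin : ∀ (i : Int) (acc : List (Int × Int)),
      (PySem.List.pyRange 0 (pvW rl) 1).foldl (fun acc j =>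
        if pvCell rl i j then
          let adjacent_count : Int := pvDirs.foldl (fun cnt d =>
            if pvValid rl (i + d.1) (j + d.2) && pvCell rl (i + d.1) (j + d.2)
            then cnt + 1 else cnt) 0
          if adjacent_count < 4 then acc ++ [(i, j)] else acc
        else acc) acc
      = acc ++ ((PySem.List.pyRange 0 (pvW rl) 1).filter (fun j =>
          pvCell rl i j && decide (pvCnt rl i j < 4))).map (fun j => (i, j)) := by
    intro i acc
    rw [PySem.List.foldl_congr_mem (g := fun acc j =>
      if pvCell rl i j && decide (pvCnt rl i j < 4) then acc ++ [(i, j)] else acc)]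
    · exact PySem.List.foldl_append_if _ _ _ _
    · intro acc j _
      by_cases hc : pvCell rl i j
      · simp [hc, pvCnt]
      · simp [hc]
  calc (PySem.List.pyRange 0 (pvN rl) 1).foldl _ ([] : List (Int × Int))
      = (PySem.List.pyRange 0 (pvN rl) 1).foldl (fun acc i =>
          acc ++ ((PySem.List.pyRange 0 (pvW rl) 1).filter (fun j =>
            pvCell rl i j && decide (pvCnt rl i j < 4))).map (fun j => (i, j))) [] := by
        exact PySem.List.foldl_congr_mem _ _ _ _ (fun acc i hi => hin i acc)
    _ = _ := by rw [PySem.List.foldl_append_eq_flatMap]; simp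

theorem pv_sum_point (l : List Int) (hnd : l.Nodup) (a : Int) (c : Int → Int) :
    (l.map (fun x => if x = a then c x else 0)).sum = if a ∈ l then c a else 0 := by
  induction l with
  | nil => simp
  | cons x l ih =>
    rcases List.nodup_cons.mp hnd with ⟨hx, hnd'⟩
    by_cases h : x = a
    · subst h
      simp [ih hnd', hx]
    · simp [h, ih hnd', List.mem_cons, Ne.symm h]

theorem pv_sum_swap {α β : Type} (l : List α) (m : List β) (f : α → β → Int) :
    (l.map (fun x => (m.map (f x)).sum)).sum = (m.map (fun y => (l.map (fun x => f x y)).sum)).sum := by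
  induction l with
  | nil => simp
  | cons x l ih =>
    simp only [List.map_cons, List.sum_cons, ih]
    rw [← PySem.List.sum_map_add_int]

theorem pv_scatter_eq_gather (rl : List String) (i0 j0 : Int)
    (hi : 0 ≤ i0 ∧ i0 < pvN rl) (hj : 0 ≤ j0 ∧ j0 < pvW rl) :
    ((PySem.List.pyRange 0 (pvN rl) 1).map (fun i =>
      ((PySem.List.pyRange 0 (pvW rl) 1).map (fun j => pvH rl i j (i0, j0))).sum)).sum
    = pvCnt rl i0 j0 := by
  -- F: contribution of cell (i,j) through direction dd to the entry (i0, j0)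
  set F : Int → Int → (Int × Int) → Int := fun i j dd =>
    if (pvCell rl i j && (pvValid rl (i + dd.1) (j + dd.2) && ((i + dd.1, j + dd.2) == (i0, j0)))) = true
    then 1 else 0 with hF
  have hH : ∀ i j : Int, pvH rl i j (i0, j0) = (pvDirs.map (F i j)).sum := by
    intro i j
    by_cases hc : pvCell rl i j
    · rw [pvH, if_pos hc, ← PySem.List.sum_map_ite_one_zero]
      refine congrArg _ (List.map_congr_left ?_)
      intro dd _
      simp [hF, hc]
    · rw [pvH, if_neg hc]
      rw [List.map_congr_left (fun dd _ => by simp [hF, hc] : ∀ dd ∈ pvDirs, F i j dd = 0)]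
      simp
  -- F concentrates at the single cell (i0 - dd.1, j0 - dd.2)
  have hpt : ∀ (dd : Int × Int) (i j : Int), 0 ≤ i ∧ i < pvN rl → 0 ≤ j ∧ j < pvW rl →
      F i j dd = if i = i0 - dd.1 then (if j = j0 - dd.2 then
        (if (0 ≤ i ∧ i < pvN rl) ∧ (0 ≤ j ∧ j < pvW rl) ∧ pvCell rl i j = true then (1:Int) else 0) else 0) else 0 := by
    intro dd i j hbi hbj
    simp only [hF, pvValid, Bool.and_eq_true, decide_eq_true_iff, beq_iff_eq, Prod.mk.injEq]
    by_cases h1 : i = i0 - dd.1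
    · by_cases h2 : j = j0 - dd.2
      · rw [if_pos h1, if_pos h2]
        refine if_congr ?_ rfl rfl
        subst h1; subst h2
        constructor
        · rintro ⟨hc, -, -, -⟩
          exact ⟨hbi, hbj, hc⟩
        · rintro ⟨-, -, hc⟩
          exact ⟨hc, ⟨⟨by omega, by omega⟩, by omega, by omega⟩, by omega, by omega⟩
      · rw [if_pos h1, if_neg h2, if_neg]
        rintro ⟨-, -, -, h⟩
        exact h2 (by omega)
    · rw [if_neg h1, if_neg]
      rintro ⟨-, -, h, -⟩
      exact h1 (by omega)
  -- the double sum for a fixed direction collapses to one indicator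
  have hdd : ∀ dd : Int × Int,
      ((PySem.List.pyRange 0 (pvN rl) 1).map (fun i =>
        ((PySem.List.pyRange 0 (pvW rl) 1).map (fun j => F i j dd)).sum)).sum
      = (if 0 ≤ i0 - dd.1 ∧ i0 - dd.1 < pvN rl then
          (if 0 ≤ j0 - dd.2 ∧ j0 - dd.2 < pvW rl then
            (if pvCell rl (i0 - dd.1) (j0 - dd.2) = true then (1:Int) else 0) else 0) else 0) := by
    intro dd
    have hin : ∀ i : Int, 0 ≤ i ∧ i < pvN rl →
        ((PySem.List.pyRange 0 (pvW rl) 1).map (fun j => F i j dd)).sum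
        = if i = i0 - dd.1 then
            (if 0 ≤ j0 - dd.2 ∧ j0 - dd.2 < pvW rl then
              (if (0 ≤ i ∧ i < pvN rl) ∧ (0 ≤ j0 - dd.2 ∧ j0 - dd.2 < pvW rl) ∧ pvCell rl i (j0 - dd.2) = true
               then (1:Int) else 0) else 0) else 0 := by
      intro i hbi
      rw [List.map_congr_left (f := fun j => F i j dd)
        (g := fun j => if i = i0 - dd.1 then (if j = j0 - dd.2 then
          (if (0 ≤ i ∧ i < pvN rl) ∧ (0 ≤ j ∧ j < pvW rl) ∧ pvCell rl i j = true then (1:Int) else 0) else 0) else 0)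
        (fun j hj' => hpt dd i j hbi (PySem.List.mem_pyRange_one.mp hj'))]
      by_cases h1 : i = i0 - dd.1
      · simp only [if_pos h1]
        rw [pv_sum_point _ (PySem.List.nodup_pyRange_one 0 (pvW rl)) (j0 - dd.2)]
        simp only [PySem.List.mem_pyRange_one]
      · rw [if_neg h1]
        rw [List.map_congr_left (fun j (_ : j ∈ PySem.List.pyRange 0 (pvW rl) 1) =>
          (if_neg h1 : (if i = i0 - dd.1 then _ else (0:Int)) = 0))]
        simp
    rw [List.map_congr_left (fun i hi' => hin i (PySem.List.mem_pyRange_one.mp hi'))]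
    rw [pv_sum_point _ (PySem.List.nodup_pyRange_one 0 (pvN rl)) (i0 - dd.1)]
    simp only [PySem.List.mem_pyRange_one]
    split_ifs <;> tauto
  -- assemble: exchange the sums, collapse per direction, reindex d ↦ -d
  rw [List.map_congr_left (fun i _ =>
    congrArg List.sum (List.map_congr_left (fun j _ => hH i j)))]
  rw [List.map_congr_left (fun i (_ : i ∈ PySem.List.pyRange 0 (pvN rl) 1) =>
    pv_sum_swap (PySem.List.pyRange 0 (pvW rl) 1) pvDirs (fun j dd => F i j dd))]
  rw [pv_sum_swap (PySem.List.pyRange 0 (pvN rl) 1) pvDirs]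
  rw [List.map_congr_left (fun dd _ => hdd dd)]
  -- reindex over the (negation-closed) direction list
  have hrev : pvDirs.reverse = pvDirs.map (fun d => (-d.1, -d.2)) := by decide
  have hsum : ∀ g : Int × Int → Int, (pvDirs.map g).sum = (pvDirs.map (fun d => g (-d.1, -d.2))).sum := by
    intro g
    rw [← List.sum_reverse, ← List.map_reverse, hrev, List.map_map]
    rfl
  rw [hsum]
  have hterm : ∀ d : Int × Int,
      (if 0 ≤ i0 - -d.1 ∧ i0 - -d.1 < pvN rl then
        (if 0 ≤ j0 - -d.2 ∧ j0 - -d.2 < pvW rl then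
          (if pvCell rl (i0 - -d.1) (j0 - -d.2) = true then (1:Int) else 0) else 0) else 0)
      = if (pvValid rl (i0 + d.1) (j0 + d.2) && pvCell rl (i0 + d.1) (j0 + d.2)) = true then 1 else 0 := by
    intro d
    simp only [sub_neg_eq_add, pvValid, Bool.and_eq_true, decide_eq_true_iff]
    split_ifs <;> tauto
  rw [List.map_congr_left (fun d _ => hterm d)]
  rw [pvCnt, PySem.List.foldl_if_add_one, PySem.List.sum_map_ite_one_zero]
  simp

theorem pv_main (rl : List String) :
    get_indices_of_rolls_to_remove rl = get_indices_of_rolls_to_remove_alt rl := by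
  by_cases h0 : rl = []
  · subst h0; rfl
  · rw [pvA_normal, get_indices_of_rolls_to_remove_alt, if_neg h0]
    rw [List.flatMap_def, List.flatMap_def]
    refine congrArg List.flatten (List.map_congr_left ?_)
    intro i hi'
    refine congrArg _ (List.filter_congr ?_)
    intro j hj'
    have hcnt :
        ((PySem.List.pyRange 0 (pvN rl) 1).foldl (fun d i =>
          (PySem.List.pyRange 0 (pvW rl) 1).foldl (fun d j =>
            if pvCell rl i j then
              pvDirs.foldl (fun d dd =>
                if pvValid rl (i + dd.1) (j + dd.2) then
                  d.insert (i + dd.1, j + dd.2) (d.getD (i + dd.1, j + dd.2) 0 + 1)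
                else d) d
            else d) d) PySem.Dict.empty).getD (i, j) 0 = pvCnt rl i j := by
      rw [pvCounts_getD]
      rw [pv_scatter_eq_gather rl i j (PySem.List.mem_pyRange_one.mp hi') (PySem.List.mem_pyRange_one.mp hj')]
      simp
    rw [hcnt]

-- ===== VERDICT (by name: the statement is the Claim_ definition above) =====
theorem get_indices_of_rolls_to_remove_spec : Claim_equal_get_indices_of_rolls_to_remove := by
  intro rolls_list _ _
  unfold Spec_get_indices_of_rolls_to_remove
  exact pv_main rolls_list
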